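-- pv_equiv track=rewrite | github.com/MusangQim/musang42-labeverycodes25 | story_10/part_I/q10pI.py | solve
-- ===== SOURCE A (Python) =====
-- from collections import deque
--
-- moves = [
--     (2,1),(2,-1),(-2,1),(-2,-1),
--     (1,2),(1,-2),(-1,2),(-1,-2)
-- ]
--
-- def solve(grid, K):
--     R = len(grid)
--     C = len(grid[0])
--
--     # ---find dragon = D--------
--     for r in range(R):
--         for c in range(C):
--             if grid[r][c] == 'D':
--                 start = (r, c)
--
--     visited = [[False]*C for _ in range(R)]
--     q = deque()
--     q.append((start[0], start[1], 0))
--     visited[start[0]][start[1]] = True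
--
--     sheep = 0
--
--     while q:
--         r, c, d = q.popleft()
--
--         if d > 0 and grid[r][c] == 'S':
--             sheep += 1
--
--         if d == K:
--             continue
--
--         for dr, dc in moves:
--             nr, nc = r+dr, c+dc
--             if 0 <= nr < R and 0 <= nc < C:
--                 if not visited[nr][nc]:
--                     visited[nr][nc] = True
--                     q.append((nr, nc, d+1))
--
--     return sheep
-- ===== SOURCE B (Python) =====
-- moves = [
--     (2,1),(2,-1),(-2,1),(-2,-1),
--     (1,2),(1,-2),(-1,2),(-1,-2)
-- ]
--
-- def solve(grid, K):
--     R = len(grid)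
--     C = len(grid[0])
--
--     for r in range(R):
--         for c in range(C):
--             if grid[r][c] == 'D':
--                 start = (r, c)
--
--     reached = [[False] * C for _ in range(R)]
--     reached[start[0]][start[1]] = True
--     sheep = 0
--     t = 0
--     # fixed-point relaxation: no queue/frontier; each round sweeps the whole
--     # grid and marks every unreached cell that has a reached knight-neighbour
--     while t < K:
--         new = [[(not reached[r][c]) and any(
--                     0 <= r + dr < R and 0 <= c + dc < C and reached[r + dr][c + dc]
--                     for dr, dc in moves)
--                 for c in range(C)] for r in range(R)]
--         if not any(map(any, new)):
--             break
--         for r in range(R):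
--             for c in range(C):
--                 if new[r][c]:
--                     reached[r][c] = True
--                     if grid[r][c] == 'S':
--                         sheep += 1
--         t += 1
--     return sheep
-- ===== Notes on version B (the rewrite author's own statement) =====
-- stated objective: alternative
-- what changed: Replaces the distance-tagged deque BFS by a queue-free fixed-point relaxation: each round sweeps the whole grid, marks every unreached cell that has a reached knight-neighbour (checking incoming edges instead of expanding a frontier), counts sheep at marking time, and stops after K rounds or when a sweep changes nothing.
-- outside the precondition, e.g. on solve([['D', '.'], ['.', '.'], ['.', 'S']], -1): A returns 1, B returns 0
import Mathlib
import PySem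

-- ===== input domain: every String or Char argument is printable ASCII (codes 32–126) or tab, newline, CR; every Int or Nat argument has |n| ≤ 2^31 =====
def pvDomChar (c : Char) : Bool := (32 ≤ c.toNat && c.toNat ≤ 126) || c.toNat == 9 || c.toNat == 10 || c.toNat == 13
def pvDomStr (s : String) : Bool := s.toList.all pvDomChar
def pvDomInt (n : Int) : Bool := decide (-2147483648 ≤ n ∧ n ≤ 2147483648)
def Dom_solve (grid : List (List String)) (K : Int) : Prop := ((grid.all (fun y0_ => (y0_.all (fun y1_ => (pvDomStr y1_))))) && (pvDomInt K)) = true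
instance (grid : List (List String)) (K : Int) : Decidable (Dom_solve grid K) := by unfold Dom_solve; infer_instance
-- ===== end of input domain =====

-- B replaces A's distance-tagged deque BFS by a queue-free fixed-point relaxation: each round
-- sweeps the whole grid marking unreached cells with a reached knight-neighbour (incoming edges,
-- no queue/frontier), stopping after K rounds or at a fixpoint; alternative, not faster.

-- ===== PORT A =====

def moves : List (Int × Int) :=
  [(2,1),(2,-1),(-2,1),(-2,-1),(1,2),(1,-2),(-1,2),(-1,-2)]

-- grid[r][c]; indices reached are in range under Pre_, default only off-domain
def cellAt (grid : List (List String)) (r c : Int) : String :=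
  PySem.List.pyGetD (PySem.List.pyGetD grid r []) c ""

-- visited[r][c]; default true only off-range (Python would raise there; unreachable under the guards)
def visGet (v : List (List Bool)) (r c : Int) : Bool :=
  (PySem.List.pyGet? ((PySem.List.pyGet? v r).getD []) c).getD true

-- visited[r][c] = True
def visSet (v : List (List Bool)) (r c : Int) : List (List Bool) :=
  PySem.List.pySetD v r (PySem.List.pySetD ((PySem.List.pyGet? v r).getD []) c true)

-- number of False entries of the visited matrix (termination measure of A's BFS loop)
def falseCountA (v : List (List Bool)) : Nat := (v.map (fun row => row.count false)).sum

-- one inner `for dr, dc in moves` step of A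
def goA (R C d : Int) (rc : Int × Int)
    (st : List (Int × Int × Int) × List (List Bool)) (m : Int × Int) :
    List (Int × Int × Int) × List (List Bool) :=
  if 0 ≤ rc.1 + m.1 ∧ rc.1 + m.1 < R ∧ 0 ≤ rc.2 + m.2 ∧ rc.2 + m.2 < C then
    if visGet st.2 (rc.1 + m.1) (rc.2 + m.2) = false then
      (st.1 ++ [(rc.1 + m.1, rc.2 + m.2, d + 1)], visSet st.2 (rc.1 + m.1) (rc.2 + m.2))
    else st
  else st

theorem count_set_true (row : List Bool) : ∀ (j : Nat), row[j]? = some false →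
    (row.set j true).count false + 1 = row.count false := by
  induction row with
  | nil => intro j h; simp at h
  | cons b t ih =>
    intro j h
    cases j with
    | zero => simp_all [List.count_cons]
    | succ j =>
      simp only [List.getElem?_cons_succ] at h
      have := ih j h
      cases b <;> simp [List.count_cons] <;> omega

theorem falseCountA_set (v : List (List Bool)) : ∀ (i : Nat) (row0 row' : List Bool),
    v[i]? = some row0 →
    falseCountA (v.set i row') + row0.count false = falseCountA v + row'.count false := by
  induction v with
  | nil => intro i r0 r' h; simp at h
  | cons r t ih =>
    intro i r0 r' h
    cases i with
    | zero =>
      simp only [List.getElem?_cons_zero, Option.some.injEq] at h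
      subst h; simp [falseCountA]; omega
    | succ i =>
      simp only [List.getElem?_cons_succ] at h
      have := ih i r0 r' h
      simp [falseCountA] at this ⊢
      omega

theorem falseCountA_flip (v : List (List Bool)) (r c : Int)
    (h0 : 0 ≤ r) (h1 : 0 ≤ c) (hf : visGet v r c = false) :
    falseCountA (visSet v r c) + 1 = falseCountA v := by
  unfold visGet at hf
  rcases hrow : PySem.List.pyGet? v r with _ | row
  · rw [hrow] at hf; simp [PySem.List.pyGet?] at hf
  · rw [hrow] at hf
    simp only [Option.getD_some] at hf
    rcases hc : PySem.List.pyGet? row c with _ | b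
    · rw [hc] at hf; simp at hf
    · rw [hc] at hf
      simp only [Option.getD_some] at hf; subst hf
      have hset : visSet v r c = v.set r.toNat (row.set c.toNat true) := by
        unfold visSet
        rw [hrow]
        simp only [Option.getD_some]
        rw [PySem.List.pySetD_of_nonneg row true h1, PySem.List.pySetD_of_nonneg v _ h0]
      rw [PySem.List.pyGet?_of_nonneg v h0] at hrow
      rw [PySem.List.pyGet?_of_nonneg row h1] at hc
      rw [hset]
      have h2 := falseCountA_set v r.toNat row (row.set c.toNat true) hrow
      have h3 := count_set_true row c.toNat hc
      omega

theorem goA_measure (R C d : Int) (rc : Int × Int) :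
    ∀ (ms : List (Int × Int)) (st : List (Int × Int × Int) × List (List Bool)),
    (ms.foldl (goA R C d rc) st).1.length + falseCountA (ms.foldl (goA R C d rc) st).2 ≤
      st.1.length + falseCountA st.2 := by
  intro ms
  induction ms with
  | nil => intro st; simp
  | cons m t ih =>
    intro st
    refine le_trans (ih _) ?_
    unfold goA
    split_ifs with hb hv
    · have := falseCountA_flip st.2 (rc.1 + m.1) (rc.2 + m.2) hb.1 hb.2.2.1 hv
      simp only [List.length_append, List.length_cons, List.length_nil]
      omega
    · simp
    · simp

def loopA (grid : List (List String)) (R C K : Int) :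
    List (Int × Int × Int) → List (List Bool) → Int → Int
  | [], _, s => s
  | (r, c, d) :: q, v, s =>
    let s' := if 0 < d ∧ cellAt grid r c = "S" then s + 1 else s
    if d = K then loopA grid R C K q v s'
    else
      let st := moves.foldl (goA R C d (r, c)) (q, v)
      loopA grid R C K st.1 st.2 s'
termination_by q v _ => q.length + falseCountA v
decreasing_by
  · simp
  · have := goA_measure R C d (r, c) moves (q, v)
    simp at this ⊢; omega

-- the dragon-finding double loop (keeps the LAST match); none = Python NameError (excluded by Pre_)
def findD (grid : List (List String)) (R C : Int) : Option (Int × Int) :=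
  (PySem.List.pyRange 0 R 1).foldl (fun acc r =>
    (PySem.List.pyRange 0 C 1).foldl (fun acc c =>
      if cellAt grid r c = "D" then some (r, c) else acc) acc) none

def solve (grid : List (List String)) (K : Int) : Int :=
  let R : Int := grid.length
  let C : Int := (PySem.List.pyGetD grid 0 ([] : List String)).length
  match findD grid R C with
  | none => 0   -- Python raises NameError here (no dragon); excluded by Pre_solve
  | some (sr, sc) =>
    let vis0 := (PySem.List.pyRange 0 R 1).map (fun _ => List.replicate C.toNat false)
    loopA grid R C K [(sr, sc, 0)] (visSet vis0 sr sc) 0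

-- ===== PORT B =====

-- entry of B's `new` comprehension: `(not reached[r][c]) and any(... reached[r+dr][c+dc] ...)`
def newCell (R C : Int) (v : List (List Bool)) (r c : Int) : Bool :=
  (!visGet v r c) && moves.any (fun m =>
    decide (0 ≤ r + m.1) && decide (r + m.1 < R) && decide (0 ≤ c + m.2) && decide (c + m.2 < C)
      && visGet v (r + m.1) (c + m.2))

-- the full `new` matrix comprehension
def newMat (R C : Int) (v : List (List Bool)) : List (List Bool) :=
  (PySem.List.pyRange 0 R 1).map (fun r =>
    (PySem.List.pyRange 0 C 1).map (fun c => newCell R C v r c))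

-- `any(map(any, new))`
def anyNew (nw : List (List Bool)) : Bool := nw.any (fun row => row.any (fun b => b))

-- the double marking/counting loop `for r ...: for c ...: if new[r][c]: ...`
def mergeLoop (grid : List (List String)) (R C : Int) (nw : List (List Bool))
    (v0 : List (List Bool)) (s0 : Int) : List (List Bool) × Int :=
  (PySem.List.pyRange 0 R 1).foldl (fun st r =>
    (PySem.List.pyRange 0 C 1).foldl (fun st c =>
      if visGet nw r c then
        (visSet st.1 r c, st.2 + (if cellAt grid r c = "S" then 1 else 0))
      else st) st) (v0, s0)

-- `while t < K: ... if not any(...): break ... t += 1`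
def sweepLoop (grid : List (List String)) (R C K : Int) :
    List (List Bool) → Int → Int → Int
  | v, s, t =>
    if ¬ t < K then s
    else
      let nw := newMat R C v
      if anyNew nw = false then s
      else
        let st := mergeLoop grid R C nw v s
        sweepLoop grid R C K st.1 st.2 (t + 1)
termination_by v s t => (K - t).toNat
decreasing_by omega

def solve_alt (grid : List (List String)) (K : Int) : Int :=
  let R : Int := grid.length
  let C : Int := (PySem.List.pyGetD grid 0 ([] : List String)).length
  match findD grid R C with
  | none => 0   -- Python raises NameError here (no dragon); excluded by Pre_solve
  | some (sr, sc) =>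
    let vis0 := (PySem.List.pyRange 0 R 1).map (fun _ => List.replicate C.toNat false)
    sweepLoop grid R C K (visSet vis0 sr sc) 0 0

-- ===== PRECONDITION & SPEC =====

-- Pre_solve excludes the inputs where A raises (empty grid, a row shorter than the first row,
-- or no 'D' cell: IndexError/NameError) and negative K, which lies outside the natural domain
-- of "within K moves" (there A's `d == K` cutoff never fires, so it searches without a limit).
def Pre_solve (grid : List (List String)) (K : Int) : Prop :=
  grid ≠ [] ∧ 0 ≤ K ∧
  (∀ row ∈ grid, (grid.headD []).length ≤ row.length) ∧
  (grid.any (fun row => (row.take (grid.headD []).length).any (fun s => s == "D"))) = true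
instance (grid : List (List String)) (K : Int) : Decidable (Pre_solve grid K) := by
  unfold Pre_solve; infer_instance

def pvWitness_solve : List (List String) × Int := ([["D", "."], [".", "S"]], 3)

def Spec_solve (grid : List (List String)) (K : Int) (out : Int) : Prop := out = solve_alt grid K
instance (grid : List (List String)) (K : Int) (out : Int) : Decidable (Spec_solve grid K out) := by
  unfold Spec_solve; infer_instance

-- ===== CLAIM (what is proved, stated in full; the proofs are below) =====
def Claim_equal_solve : Prop := ∀ (grid : List (List String)) (K : Int),
  Dom_solve grid K → Pre_solve grid K → Spec_solve grid K (solve grid K)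

-- ===== LEMMAS AND PROOFS =====

-- ---- generic notions used by the proofs ----

def inb (R C : Int) (p : Int × Int) : Prop :=
  0 ≤ p.1 ∧ p.1 < R ∧ 0 ≤ p.2 ∧ p.2 < C

def Shape (R C : Int) (v : List (List Bool)) : Prop :=
  (v.length : Int) = R ∧ ∀ row ∈ v, (row.length : Int) = C

-- mark a list of cells as visited, in order
def mark (v : List (List Bool)) (l : List (Int × Int)) : List (List Bool) :=
  l.foldl (fun w p => visSet w p.1 p.2) v

-- the row-major list of cells B's sweep selects in one round
def selList (R C : Int) (v : List (List Bool)) : List (Int × Int) :=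
  (PySem.List.pyRange 0 R 1).flatMap (fun r =>
    ((PySem.List.pyRange 0 C 1).filter (fun c => newCell R C v r c)).map (fun c => (r, c)))

def countS_ (grid : List (List String)) (l : List (Int × Int)) : Int :=
  (l.map (fun p => if cellAt grid p.1 p.2 = "S" then (1 : Int) else 0)).sum

theorem moves_symm : ∀ m ∈ moves, ((-m.1, -m.2) : Int × Int) ∈ moves := by decide

theorem mark_append (v : List (List Bool)) (a b : List (Int × Int)) :
    mark v (a ++ b) = mark (mark v a) b := by
  simp [mark, List.foldl_append]

theorem visSet_eq_set (v : List (List Bool)) (r c : Int) (hr : 0 ≤ r) (hc : 0 ≤ c) :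
    visSet v r c = v.set r.toNat (((PySem.List.pyGet? v r).getD []).set c.toNat true) := by
  unfold visSet
  rw [PySem.List.pySetD_of_nonneg _ _ hc, PySem.List.pySetD_of_nonneg _ _ hr]

theorem row_of_shape (R C : Int) (v : List (List Bool)) (r : Int)
    (hs : Shape R C v) (hr : 0 ≤ r) (hrR : r < R) :
    ∃ hlen : r.toNat < v.length,
      PySem.List.pyGet? v r = some v[r.toNat] ∧ ((v[r.toNat]).length : Int) = C := by
  have hlen : r.toNat < v.length := by
    have := hs.1; omega
  refine ⟨hlen, ?_, hs.2 _ (List.getElem_mem hlen)⟩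
  rw [PySem.List.pyGet?_of_nonneg v hr, List.getElem?_eq_getElem hlen]

theorem shape_visSet (R C : Int) (v : List (List Bool)) (r c : Int)
    (hs : Shape R C v) (hq : inb R C (r, c)) : Shape R C (visSet v r c) := by
  obtain ⟨hr, hrR, hc, hcC⟩ := hq
  obtain ⟨hlen, hget, hrow⟩ := row_of_shape R C v r hs hr hrR
  rw [visSet_eq_set v r c hr hc, hget]
  refine ⟨by simpa using hs.1, ?_⟩
  intro row hmem
  rcases List.mem_or_eq_of_mem_set hmem with h | h
  · exact hs.2 row h
  · subst h
    simpa using hrow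

theorem visGet_nat (v : List (List Bool)) (i j : Nat) :
    visGet v (i : Int) (j : Int) = ((v[i]?.getD [])[j]?.getD true) := by
  unfold visGet
  rw [PySem.List.pyGet?_of_nonneg v (by positivity), PySem.List.pyGet?_of_nonneg _ (by positivity)]
  simp

theorem visGet_visSet (R C : Int) (v : List (List Bool)) (r c r' c' : Int)
    (hs : Shape R C v) (hq : inb R C (r, c)) (hq' : inb R C (r', c')) :
    visGet (visSet v r c) r' c' = if r' = r ∧ c' = c then true else visGet v r' c' := by
  obtain ⟨hr, hrR, hc, hcC⟩ := hq
  obtain ⟨hr', hrR', hc', hcC'⟩ := hq'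
  obtain ⟨hlen, hget, hrow⟩ := row_of_shape R C v r hs hr hrR
  obtain ⟨hlen', hget', hrow'⟩ := row_of_shape R C v r' hs hr' hrR'
  rw [visSet_eq_set v r c hr hc, hget]
  unfold visGet
  rw [PySem.List.pyGet?_of_nonneg _ hr']
  by_cases hrr : r' = r
  · subst hrr
    rw [List.getElem?_set_self hlen]
    simp only [Option.getD_some, Option.getD_some]
    rw [PySem.List.pyGet?_of_nonneg _ hc']
    by_cases hcc : c' = c
    · subst hcc
      have hclen : c'.toNat < (v[r'.toNat]).length := by omega
      rw [List.getElem?_set_self hclen]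
      simp
    · have hne : c.toNat ≠ c'.toNat := by omega
      rw [List.getElem?_set_ne hne, hget']
      simp only [Option.getD_some]
      rw [PySem.List.pyGet?_of_nonneg _ hc']
      simp [hcc]
  · have hne : r.toNat ≠ r'.toNat := by omega
    rw [List.getElem?_set_ne hne, hget']
    simp only [Option.getD_some]
    have : ¬ (r' = r ∧ c' = c) := fun h => hrr h.1
    rw [if_neg this, List.getElem?_eq_getElem hlen']
    simp

theorem shape_mark (R C : Int) (v : List (List Bool)) (l : List (Int × Int))
    (hs : Shape R C v) (hl : ∀ p ∈ l, inb R C p) : Shape R C (mark v l) := by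
  induction l generalizing v with
  | nil => exact hs
  | cons p t ih =>
    have hp := hl p (List.mem_cons_self ..)
    exact ih _ (shape_visSet R C v p.1 p.2 hs hp) (fun q hq => hl q (List.mem_cons_of_mem _ hq))

theorem visGet_mark (R C : Int) (v : List (List Bool)) (l : List (Int × Int)) (q : Int × Int)
    (hs : Shape R C v) (hl : ∀ p ∈ l, inb R C p) (hq : inb R C q) :
    visGet (mark v l) q.1 q.2 = (visGet v q.1 q.2 || decide (q ∈ l)) := by
  induction l generalizing v with
  | nil => simp [mark]
  | cons p t ih =>
    have hp := hl p (List.mem_cons_self ..)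
    have hstep : mark v (p :: t) = mark (visSet v p.1 p.2) t := rfl
    rw [hstep, ih _ (shape_visSet R C v p.1 p.2 hs hp)
      (fun x hx => hl x (List.mem_cons_of_mem _ hx)),
      visGet_visSet R C v p.1 p.2 q.1 q.2 hs hp hq]
    by_cases h : q = p
    · subst h; simp
    · have : ¬ (q.1 = p.1 ∧ q.2 = p.2) := by
        intro hc; exact h (Prod.ext hc.1 hc.2)
      simp [this, h]

theorem matEq (R C : Int) (v w : List (List Bool))
    (hv : Shape R C v) (hw : Shape R C w)
    (hpt : ∀ r c : Int, inb R C (r, c) → visGet v r c = visGet w r c) : v = w := by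
  have hL : v.length = w.length := by
    have := hv.1; have := hw.1; omega
  apply List.ext_getElem hL
  intro i h1 h2
  have hvi : ((v[i]).length : Int) = C := hv.2 _ (List.getElem_mem h1)
  have hwi : ((w[i]).length : Int) = C := hw.2 _ (List.getElem_mem h2)
  apply List.ext_getElem (by omega)
  intro j hj1 hj2
  have hib : inb R C ((i : Int), (j : Int)) := by
    refine ⟨by positivity, ?_, by positivity, ?_⟩
    · have := hv.1; simp; omega
    · simp; omega
  have hp := hpt i j hib
  rw [visGet_nat, visGet_nat] at hp
  have e1 : v[(i:Nat)]? = some v[i] := List.getElem?_eq_getElem h1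
  have e2 : w[(i:Nat)]? = some w[i] := List.getElem?_eq_getElem h2
  rw [e1, e2] at hp
  simp only [Option.getD_some] at hp
  rw [List.getElem?_eq_getElem hj1, List.getElem?_eq_getElem hj2] at hp
  simpa using hp

-- ---- B's selection list: membership and nodup ----

theorem mem_selList (R C : Int) (v : List (List Bool)) (q : Int × Int) :
    q ∈ selList R C v ↔ inb R C q ∧ newCell R C v q.1 q.2 = true := by
  unfold selList
  simp only [List.mem_flatMap, List.mem_map, List.mem_filter, PySem.List.mem_pyRange_one]
  constructor
  · rintro ⟨r, ⟨hr0, hrR⟩, c, ⟨⟨hc0, hcC⟩, hcell⟩, rfl⟩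
    exact ⟨⟨hr0, hrR, hc0, hcC⟩, hcell⟩
  · rintro ⟨⟨h1, h2, h3, h4⟩, hcell⟩
    exact ⟨q.1, ⟨h1, h2⟩, q.2, ⟨⟨h3, h4⟩, hcell⟩, rfl⟩

theorem nodup_selList (R C : Int) (v : List (List Bool)) : (selList R C v).Nodup := by
  unfold selList
  refine List.nodup_flatMap.2 ⟨?_, ?_⟩
  · intro r _
    refine List.Nodup.map ?_ (List.Nodup.filter _ (PySem.List.nodup_pyRange_one 0 C))
    intro a b h
    simpa using h
  · refine List.Pairwise.imp ?_ (PySem.List.nodup_pyRange_one 0 R)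
    intro a b hab x hxa hxb
    simp only [List.mem_map, List.mem_filter] at hxa hxb
    obtain ⟨c1, _, h1⟩ := hxa
    obtain ⟨c2, _, h2⟩ := hxb
    rw [← h1] at h2
    simp only [Prod.mk.injEq] at h2
    exact hab h2.1.symm

-- ---- the merge double loop = mark + count over selList ----

theorem foldl_if_pair {α : Type} (p : α → Bool) (g : List (List Bool) → α → List (List Bool))
    (h : α → Int) :
    ∀ (l : List α) (v : List (List Bool)) (s : Int),
    l.foldl (fun st x => if p x then (g st.1 x, st.2 + h x) else st) (v, s)
      = ((l.filter p).foldl g v, s + ((l.filter p).map h).sum) := by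
  intro l
  induction l with
  | nil => intro v s; simp
  | cons x t ih =>
    intro v s
    by_cases hx : p x = true
    · rw [List.foldl_cons, if_pos hx, ih, List.filter_cons_of_pos hx, List.foldl_cons,
        List.map_cons, List.sum_cons]
      refine Prod.ext rfl ?_
      simp
      omega
    · rw [List.foldl_cons, if_neg (by simp [hx]), ih, List.filter_cons_of_neg (by simp [hx])]

theorem newMat_get (R C : Int) (v : List (List Bool)) (r c : Int)
    (hr : 0 ≤ r) (hrR : r < R) (hc : 0 ≤ c) (hcC : c < C) :
    visGet (newMat R C v) r c = newCell R C v r c := by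
  unfold newMat visGet
  rw [PySem.List.pyGet?_of_nonneg _ hr]
  have hlen : r.toNat < ((PySem.List.pyRange 0 R 1).map
      (fun r => (PySem.List.pyRange 0 C 1).map (fun c => newCell R C v r c))).length := by
    simp [PySem.List.length_pyRange_one]
    omega
  rw [List.getElem?_eq_getElem hlen]
  simp only [List.getElem_map, Option.getD_some]
  rw [PySem.List.pyGet?_of_nonneg _ hc]
  have hclen : c.toNat < ((PySem.List.pyRange 0 C 1).map (fun c => newCell R C v
      ((PySem.List.pyRange 0 R 1)[r.toNat]'(by simpa [PySem.List.length_pyRange_one] using hlen)) c)).length := by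
    simp [PySem.List.length_pyRange_one]
    omega
  rw [List.getElem?_eq_getElem hclen]
  simp only [List.getElem_map, Option.getD_some, PySem.List.getElem_pyRange_one]
  congr 1 <;> omega

theorem mergeRow_eq (grid : List (List String)) (R C : Int) (v : List (List Bool)) (r : Int)
    (hr : 0 ≤ r) (hrR : r < R) (v0 : List (List Bool)) (s0 : Int) :
    (PySem.List.pyRange 0 C 1).foldl (fun st c =>
      if visGet (newMat R C v) r c then
        (visSet st.1 r c, st.2 + (if cellAt grid r c = "S" then 1 else 0))
      else st) (v0, s0)
    = (mark v0 (((PySem.List.pyRange 0 C 1).filter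
          (fun c => newCell R C v r c)).map (fun c => (r, c))),
       s0 + countS_ grid (((PySem.List.pyRange 0 C 1).filter
          (fun c => newCell R C v r c)).map (fun c => (r, c)))) := by
  rw [foldl_if_pair (fun c => visGet (newMat R C v) r c) (fun w c => visSet w r c)
    (fun c => if cellAt grid r c = "S" then 1 else 0)]
  have hf : (PySem.List.pyRange 0 C 1).filter (fun c => visGet (newMat R C v) r c)
      = (PySem.List.pyRange 0 C 1).filter (fun c => newCell R C v r c) := by
    apply List.filter_congr
    intro c hc
    obtain ⟨hc0, hcC⟩ := PySem.List.mem_pyRange_one.1 hc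
    rw [newMat_get R C v r c hr hrR hc0 hcC]
  rw [hf]
  refine Prod.ext ?_ ?_
  · simp [mark, List.foldl_map]
  · simp [countS_, List.map_map, Function.comp_def]

theorem mergeLoop_eq (grid : List (List String)) (R C : Int) (v v0 : List (List Bool)) (s0 : Int) :
    mergeLoop grid R C (newMat R C v) v0 s0
      = (mark v0 (selList R C v), s0 + countS_ grid (selList R C v)) := by
  have main : ∀ (rs : List Int), (∀ r ∈ rs, 0 ≤ r ∧ r < R) → ∀ (v0 : List (List Bool)) (s0 : Int),
      rs.foldl (fun st r =>
        (PySem.List.pyRange 0 C 1).foldl (fun st c =>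
          if visGet (newMat R C v) r c then
            (visSet st.1 r c, st.2 + (if cellAt grid r c = "S" then 1 else 0))
          else st) st) (v0, s0)
      = (mark v0 (rs.flatMap (fun r => ((PySem.List.pyRange 0 C 1).filter
            (fun c => newCell R C v r c)).map (fun c => (r, c)))),
         s0 + countS_ grid (rs.flatMap (fun r => ((PySem.List.pyRange 0 C 1).filter
            (fun c => newCell R C v r c)).map (fun c => (r, c))))) := by
    intro rs
    induction rs with
    | nil => intro _ v0 s0; simp [mark, countS_]
    | cons r t ih =>
      intro hrs v0 s0
      obtain ⟨hr0, hrR⟩ := hrs r (List.mem_cons_self ..)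
      rw [List.foldl_cons, mergeRow_eq grid R C v r hr0 hrR v0 s0,
        ih (fun x hx => hrs x (List.mem_cons_of_mem _ hx)), List.flatMap_cons, mark_append]
      refine Prod.ext rfl ?_
      simp [countS_]
      omega
  have := main (PySem.List.pyRange 0 R 1)
    (fun r hr => PySem.List.mem_pyRange_one.1 hr) v0 s0
  exact this

theorem anyNew_iff (R C : Int) (v : List (List Bool)) :
    anyNew (newMat R C v) = false ↔ selList R C v = [] := by
  have h1 : anyNew (newMat R C v) = true ↔ ∃ q : Int × Int, q ∈ selList R C v := by
    unfold anyNew newMat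
    simp only [List.any_eq_true]
    constructor
    · rintro ⟨row, hrow, b, hb, hbt⟩
      obtain ⟨r, hrm, rfl⟩ := List.mem_map.1 hrow
      obtain ⟨c, hcm, rfl⟩ := List.mem_map.1 hb
      obtain ⟨hr0, hrR⟩ := PySem.List.mem_pyRange_one.1 hrm
      obtain ⟨hc0, hcC⟩ := PySem.List.mem_pyRange_one.1 hcm
      exact ⟨(r, c), (mem_selList R C v (r, c)).2 ⟨⟨hr0, hrR, hc0, hcC⟩, hbt⟩⟩
    · rintro ⟨q, hq⟩
      obtain ⟨⟨h1, h2, h3, h4⟩, hcell⟩ := (mem_selList R C v q).1 hq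
      refine ⟨_, List.mem_map.2 ⟨q.1, PySem.List.mem_pyRange_one.2 ⟨h1, h2⟩, rfl⟩,
        _, List.mem_map.2 ⟨q.2, PySem.List.mem_pyRange_one.2 ⟨h3, h4⟩, rfl⟩, hcell⟩
  constructor
  · intro h
    rw [List.eq_nil_iff_forall_not_mem]
    intro q hq
    have := h1.2 ⟨q, hq⟩
    rw [h] at this
    exact absurd this (by simp)
  · intro h
    cases hA : anyNew (newMat R C v)
    · rfl
    · obtain ⟨q, hq⟩ := h1.1 hA
      rw [h] at hq
      exact absurd hq (List.not_mem_nil)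

-- ---- ghost frontier BFS (proof-only intermediate between A's deque BFS and B's sweeps) ----

def goB (grid : List (List String)) (R C : Int) (rc : Int × Int)
    (st : List (Int × Int) × List (List Bool) × Int) (m : Int × Int) :
    List (Int × Int) × List (List Bool) × Int :=
  if 0 ≤ rc.1 + m.1 ∧ rc.1 + m.1 < R ∧ 0 ≤ rc.2 + m.2 ∧ rc.2 + m.2 < C ∧
      visGet st.2.1 (rc.1 + m.1) (rc.2 + m.2) = false then
    (st.1 ++ [(rc.1 + m.1, rc.2 + m.2)], visSet st.2.1 (rc.1 + m.1) (rc.2 + m.2),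
      st.2.2 + (if cellAt grid (rc.1 + m.1) (rc.2 + m.2) = "S" then 1 else 0))
  else st

def stepB (grid : List (List String)) (R C : Int)
    (st : List (Int × Int) × List (List Bool) × Int) (rc : Int × Int) :
    List (Int × Int) × List (List Bool) × Int :=
  moves.foldl (goB grid R C rc) st

def loopB (grid : List (List String)) (R C K : Int) :
    List (Int × Int) → List (List Bool) → Int → Int → Int
  | frontier, v, sheep, level =>
    if frontier = [] ∨ ¬ level < K then sheep
    else
      let st := frontier.foldl (stepB grid R C) (([] : List (Int × Int)), v, sheep)
      loopB grid R C K st.1 st.2.1 st.2.2 (level + 1)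
termination_by _ _ _ level => (K - level).toNat
decreasing_by omega

-- ---- A = ghost (layered queue = frontier loop) ----

def tagd (d : Int) (l : List (Int × Int)) : List (Int × Int × Int) :=
  l.map (fun p => (p.1, p.2, d))

def popCount (grid : List (List String)) (d : Int) (l : List (Int × Int)) : Int :=
  (l.map (fun p => if 0 < d ∧ cellAt grid p.1 p.2 = "S" then (1 : Int) else 0)).sum

theorem popCount_eq (grid : List (List String)) (d : Int) (hd : 0 < d) (l : List (Int × Int)) :
    popCount grid d l = countS_ grid l := by
  unfold popCount countS_
  congr 1
  apply List.map_congr_left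
  intro p _
  simp [hd]

theorem goA_acc (R C d : Int) (rc : Int × Int) :
    ∀ (ms : List (Int × Int)) (q : List (Int × Int × Int)) (v : List (List Bool)),
    ms.foldl (goA R C d rc) (q, v) =
      (q ++ (ms.foldl (goA R C d rc) ([], v)).1, (ms.foldl (goA R C d rc) ([], v)).2) := by
  intro ms
  induction ms with
  | nil => intro q v; simp
  | cons m t ih =>
    intro q v
    simp only [List.foldl_cons, goA]
    split_ifs with hb hv
    · rw [ih (q ++ [(rc.1 + m.1, rc.2 + m.2, d + 1)]),
        ih ([] ++ [(rc.1 + m.1, rc.2 + m.2, d + 1)])]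
      simp
    · exact ih q v
    · exact ih q v

theorem goB_acc (grid : List (List String)) (R C : Int) (rc : Int × Int) :
    ∀ (ms : List (Int × Int)) (nxt : List (Int × Int)) (v : List (List Bool)) (s : Int),
    ms.foldl (goB grid R C rc) (nxt, v, s) =
      (nxt ++ (ms.foldl (goB grid R C rc) ([], v, 0)).1,
        (ms.foldl (goB grid R C rc) ([], v, 0)).2.1,
        s + (ms.foldl (goB grid R C rc) ([], v, 0)).2.2) := by
  intro ms
  induction ms with
  | nil => intro nxt v s; simp
  | cons m t ih =>
    intro nxt v s
    simp only [List.foldl_cons, goB]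
    split_ifs with hb hc <;>
      [ (rw [ih, ih ([] ++ [(rc.1 + m.1, rc.2 + m.2)]) (visSet v (rc.1 + m.1) (rc.2 + m.2))];
          simp [List.append_assoc]; try omega);
        (rw [ih, ih ([] ++ [(rc.1 + m.1, rc.2 + m.2)]) (visSet v (rc.1 + m.1) (rc.2 + m.2))];
          simp [List.append_assoc]; try omega);
        exact ih nxt v s ]

theorem go_core (grid : List (List String)) (R C d : Int) (rc : Int × Int) :
    ∀ (ms : List (Int × Int)) (v : List (List Bool)),
    ms.foldl (goA R C d rc) ([], v) =
      (tagd (d + 1) (ms.foldl (goB grid R C rc) ([], v, 0)).1,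
        (ms.foldl (goB grid R C rc) ([], v, 0)).2.1) ∧
    (ms.foldl (goB grid R C rc) ([], v, 0)).2.2 =
      countS_ grid (ms.foldl (goB grid R C rc) ([], v, 0)).1 := by
  intro ms
  induction ms with
  | nil => intro v; simp [tagd, countS_]
  | cons m t ih =>
    intro v
    by_cases hb : 0 ≤ rc.1 + m.1 ∧ rc.1 + m.1 < R ∧ 0 ≤ rc.2 + m.2 ∧ rc.2 + m.2 < C
    · by_cases hv : visGet v (rc.1 + m.1) (rc.2 + m.2) = false
      · have hv' := hv
        have hA : goA R C d rc ([], v) m =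
            ([] ++ [(rc.1 + m.1, rc.2 + m.2, d + 1)], visSet v (rc.1 + m.1) (rc.2 + m.2)) := by
          simp [goA, hb, hv]
        have hB : goB grid R C rc ([], v, 0) m =
            ([] ++ [(rc.1 + m.1, rc.2 + m.2)], visSet v (rc.1 + m.1) (rc.2 + m.2),
              0 + (if cellAt grid (rc.1 + m.1) (rc.2 + m.2) = "S" then (1 : Int) else 0)) := by
          simp [goB, hb.1, hb.2.1, hb.2.2.1, hb.2.2.2, hv']
        obtain ⟨ih1, ih2⟩ := ih (visSet v (rc.1 + m.1) (rc.2 + m.2))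
        rw [List.foldl_cons, List.foldl_cons, hA, hB,
          goA_acc R C d rc t, goB_acc grid R C rc t, ih1, ih2]
        refine ⟨?_, ?_⟩
        · simp [tagd]
        · simp [countS_]; try ring
      · have hv' := hv
        have hA : goA R C d rc ([], v) m = ([], v) := by simp [goA, hb, hv]
        have hB : goB grid R C rc ([], v, 0) m = ([], v, 0) := by simp [goB, hv']
        rw [List.foldl_cons, List.foldl_cons, hA, hB]
        exact ih v
    · have hA : goA R C d rc ([], v) m = ([], v) := by simp [goA, hb]
      have hB : goB grid R C rc ([], v, 0) m = ([], v, 0) := by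
        simp only [goB]
        rw [if_neg]
        tauto
      rw [List.foldl_cons, List.foldl_cons, hA, hB]
      exact ih v

theorem stepB_acc (grid : List (List String)) (R C : Int) :
    ∀ (cur : List (Int × Int)) (nxt : List (Int × Int)) (v : List (List Bool)) (s : Int),
    cur.foldl (stepB grid R C) (nxt, v, s) =
      (nxt ++ (cur.foldl (stepB grid R C) ([], v, 0)).1,
        (cur.foldl (stepB grid R C) ([], v, 0)).2.1,
        s + (cur.foldl (stepB grid R C) ([], v, 0)).2.2) := by
  intro cur
  induction cur with
  | nil => intro nxt v s; simp
  | cons p t ih =>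
    intro nxt v s
    have h1 : stepB grid R C (nxt, v, s) p =
        (nxt ++ (stepB grid R C ([], v, 0) p).1, (stepB grid R C ([], v, 0) p).2.1,
          s + (stepB grid R C ([], v, 0) p).2.2) := by
      unfold stepB
      exact goB_acc grid R C p moves nxt v s
    rw [List.foldl_cons, List.foldl_cons, h1,
      ih (nxt ++ (stepB grid R C ([], v, 0) p).1) (stepB grid R C ([], v, 0) p).2.1
        (s + (stepB grid R C ([], v, 0) p).2.2),
      ih ((stepB grid R C ([], v, 0) p).1) (stepB grid R C ([], v, 0) p).2.1
        ((stepB grid R C ([], v, 0) p).2.2)]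
    simp [List.append_assoc]
    ring

theorem stepB_sheep (grid : List (List String)) (R C : Int) :
    ∀ (cur : List (Int × Int)) (v : List (List Bool)),
    (cur.foldl (stepB grid R C) ([], v, 0)).2.2 =
      countS_ grid (cur.foldl (stepB grid R C) ([], v, 0)).1 := by
  intro cur
  induction cur with
  | nil => intro v; simp [countS_]
  | cons p t ih =>
    intro v
    have hcell := (go_core grid R C 0 p moves v).2
    rw [List.foldl_cons,
      stepB_acc grid R C t ((stepB grid R C ([], v, 0) p).1) ((stepB grid R C ([], v, 0) p).2.1)
        ((stepB grid R C ([], v, 0) p).2.2)]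
    have h2 : (stepB grid R C ([], v, 0) p).2.2 = countS_ grid (stepB grid R C ([], v, 0) p).1 :=
      hcell
    have h3 : ∀ (a b : List (Int × Int)), countS_ grid (a ++ b) = countS_ grid a + countS_ grid b := by
      intro a b; simp [countS_]
    simp only [h2, ih (stepB grid R C ([], v, 0) p).2.1, h3]

theorem loopA_drainK (grid : List (List String)) (R C K : Int) :
    ∀ (cur : List (Int × Int)) (v : List (List Bool)) (s : Int),
    loopA grid R C K (tagd K cur) v s = s + popCount grid K cur := by
  intro cur
  induction cur with
  | nil => intro v s; simp [tagd, popCount, loopA]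
  | cons p t ih =>
    intro v s
    have h1 : tagd K (p :: t) = (p.1, p.2, K) :: tagd K t := rfl
    rw [h1, loopA]
    simp only [if_pos rfl]
    rw [ih]
    have h2 : popCount grid K (p :: t) =
        (if 0 < K ∧ cellAt grid p.1 p.2 = "S" then (1 : Int) else 0) + popCount grid K t := by
      simp [popCount]
    rw [h2]
    split_ifs <;> ring

theorem loopA_layer (grid : List (List String)) (R C K d : Int) (hd : d ≠ K) :
    ∀ (cur nxt : List (Int × Int)) (v : List (List Bool)) (s : Int),
    loopA grid R C K (tagd d cur ++ tagd (d + 1) nxt) v s =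
      loopA grid R C K
        (tagd (d + 1) (nxt ++ (cur.foldl (stepB grid R C) ([], v, 0)).1))
        (cur.foldl (stepB grid R C) ([], v, 0)).2.1
        (s + popCount grid d cur) := by
  intro cur
  induction cur with
  | nil =>
    intro nxt v s
    simp [tagd, popCount]
  | cons p t ih =>
    intro nxt v s
    have h1 : tagd d (p :: t) ++ tagd (d + 1) nxt =
        (p.1, p.2, d) :: (tagd d t ++ tagd (d + 1) nxt) := rfl
    rw [h1, loopA]
    simp only [if_neg hd]
    have hG := go_core grid R C d p moves v
    have hBG : stepB grid R C ([], v, 0) p = moves.foldl (goB grid R C p) ([], v, 0) := rfl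
    rw [goA_acc R C d p moves, hG.1]
    have h2 : tagd d t ++ tagd (d + 1) nxt ++
        tagd (d + 1) (List.foldl (goB grid R C p) ([], v, 0) moves).1 =
        tagd d t ++ tagd (d + 1) (nxt ++ (List.foldl (goB grid R C p) ([], v, 0) moves).1) := by
      simp [tagd]
    rw [h2, ih]
    have h3 : (p :: t).foldl (stepB grid R C) ([], v, 0) =
        t.foldl (stepB grid R C) (moves.foldl (goB grid R C p) ([], v, 0)) := by
      rw [List.foldl_cons, hBG]
    rw [h3, stepB_acc grid R C t (moves.foldl (goB grid R C p) ([], v, 0)).1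
      (moves.foldl (goB grid R C p) ([], v, 0)).2.1 (moves.foldl (goB grid R C p) ([], v, 0)).2.2]
    have h4 : popCount grid d (p :: t) =
        (if 0 < d ∧ cellAt grid p.1 p.2 = "S" then (1 : Int) else 0) + popCount grid d t := by
      simp [popCount]
    rw [h4]
    simp only [List.append_assoc]
    split_ifs <;> ring_nf

theorem loop_main (grid : List (List String)) (R C K : Int) :
    ∀ (n : Nat) (d : Int) (cur : List (Int × Int)) (v : List (List Bool)) (s : Int),
    (K - d).toNat = n → 0 < d → d ≤ K →
    loopA grid R C K (tagd d cur) v s = loopB grid R C K cur v (s + countS_ grid cur) d := by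
  intro n
  induction n using Nat.strong_induction_on with
  | _ n IH =>
    intro d cur v s hn hd hdK
    rcases eq_or_ne cur [] with hc | hc
    · subst hc
      rw [loopB]
      simp [tagd, countS_, loopA]
    · rcases eq_or_ne d K with hK | hK
      · subst hK
        rw [loopA_drainK, popCount_eq grid d hd, loopB]
        simp [lt_irrefl]
      · have hdK' : d < K := lt_of_le_of_ne hdK hK
        have hnil : tagd d cur = tagd d cur ++ tagd (d + 1) [] := by simp [tagd]
        rw [hnil, loopA_layer grid R C K d hK cur [] v s, loopB]
        rw [if_neg (by simp [hc, hdK'])]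
        have hQ : ([] : List (Int × Int)) ++ (cur.foldl (stepB grid R C) ([], v, 0)).1 =
            (cur.foldl (stepB grid R C) ([], v, 0)).1 := by simp
        rw [hQ]
        have hs := stepB_acc grid R C cur [] v (s + countS_ grid cur)
        rw [hs]
        have hsh := stepB_sheep grid R C cur v
        have hIH := IH ((K - (d + 1)).toNat) (by omega) (d + 1)
          (cur.foldl (stepB grid R C) ([], v, 0)).1
          (cur.foldl (stepB grid R C) ([], v, 0)).2.1
          (s + popCount grid d cur) rfl (by omega) (by omega)
        rw [hIH, popCount_eq grid d hd, hsh]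
        simp

theorem start_step (grid : List (List String)) (R C K : Int) (hK : 0 < K) (sr sc : Int)
    (v : List (List Bool)) :
    loopA grid R C K [(sr, sc, 0)] v 0 = loopB grid R C K [(sr, sc)] v 0 0 := by
  rw [loopA]
  have h0 : ¬ ((0 : Int) < 0 ∧ cellAt grid sr sc = "S") := by simp
  rw [if_neg h0, if_neg (by omega : ¬ (0 : Int) = K)]
  have hG := go_core grid R C 0 (sr, sc) moves v
  rw [goA_acc R C 0 (sr, sc) moves, hG.1]
  simp only [List.nil_append]
  have hmain := loop_main grid R C K ((K - 1).toNat) (0 + 1)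
    (moves.foldl (goB grid R C (sr, sc)) ([], v, 0)).1
    (moves.foldl (goB grid R C (sr, sc)) ([], v, 0)).2.1 0 rfl (by omega) (by omega)
  rw [hmain]
  conv_rhs => rw [loopB]
  rw [if_neg (by simp [hK])]
  have hstep : [(sr, sc)].foldl (stepB grid R C) ([], v, 0) =
      moves.foldl (goB grid R C (sr, sc)) ([], v, 0) := rfl
  rw [hstep]; dsimp only; rw [hG.2]
  simp

-- ---- ghost round: structure of one frontier expansion ----

theorem go_round (grid : List (List String)) (R C : Int) (p : Int × Int) :
    ∀ (ms : List (Int × Int)) (v : List (List Bool)) (nxt : List (Int × Int)) (s : Int),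
    Shape R C v → (∀ q ∈ nxt, inb R C q ∧ visGet v q.1 q.2 = false) → nxt.Nodup →
    (ms.foldl (goB grid R C p) (nxt, mark v nxt, s)).2.1
        = mark v (ms.foldl (goB grid R C p) (nxt, mark v nxt, s)).1 ∧
    (ms.foldl (goB grid R C p) (nxt, mark v nxt, s)).1.Nodup ∧
    (∀ q ∈ (ms.foldl (goB grid R C p) (nxt, mark v nxt, s)).1,
        inb R C q ∧ visGet v q.1 q.2 = false) ∧
    (∀ q, q ∈ (ms.foldl (goB grid R C p) (nxt, mark v nxt, s)).1 ↔ q ∈ nxt ∨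
      (inb R C q ∧ visGet v q.1 q.2 = false ∧
        ∃ m ∈ ms, q.1 = p.1 + m.1 ∧ q.2 = p.2 + m.2)) := by
  intro ms
  induction ms with
  | nil =>
    intro v nxt s hs hnxt hnd
    exact ⟨rfl, hnd, hnxt, by simp⟩
  | cons m t ih =>
    intro v nxt s hs hnxt hnd
    rw [List.foldl_cons]
    have hinb : ∀ x ∈ nxt, inb R C x := fun x hx => (hnxt x hx).1
    by_cases hb : 0 ≤ p.1 + m.1 ∧ p.1 + m.1 < R ∧ 0 ≤ p.2 + m.2 ∧ p.2 + m.2 < C ∧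
        visGet (mark v nxt) (p.1 + m.1) (p.2 + m.2) = false
    · have hstep : goB grid R C p (nxt, mark v nxt, s) m =
          (nxt ++ [(p.1 + m.1, p.2 + m.2)], visSet (mark v nxt) (p.1 + m.1) (p.2 + m.2),
            s + (if cellAt grid (p.1 + m.1) (p.2 + m.2) = "S" then 1 else 0)) := by
        unfold goB
        rw [if_pos hb]
      set q0 : Int × Int := (p.1 + m.1, p.2 + m.2) with hq0
      have hq0in : inb R C q0 := ⟨hb.1, hb.2.1, hb.2.2.1, hb.2.2.2.1⟩
      have hvm := visGet_mark R C v nxt q0 hs hinb hq0in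
      rw [hb.2.2.2.2] at hvm
      have hq0v : visGet v q0.1 q0.2 = false ∧ q0 ∉ nxt := by
        constructor
        · cases hx : visGet v q0.1 q0.2
          · rfl
          · rw [hx] at hvm; simp at hvm
        · intro hmem
          simp [hmem] at hvm
      have hmark : visSet (mark v nxt) q0.1 q0.2 = mark v (nxt ++ [q0]) := by
        rw [mark_append]; rfl
      rw [hstep, hmark]
      have hnxt' : ∀ x ∈ nxt ++ [q0], inb R C x ∧ visGet v x.1 x.2 = false := by
        intro x hx
        rcases List.mem_append.1 hx with h | h
        · exact hnxt x h
        · rw [List.mem_singleton.1 h]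
          exact ⟨hq0in, hq0v.1⟩
      have hnd' : (nxt ++ [q0]).Nodup := by
        rw [List.nodup_append]
        refine ⟨hnd, List.nodup_singleton _, ?_⟩
        intro a ha b hb
        rw [List.mem_singleton.1 hb]
        intro he
        exact hq0v.2 (he ▸ ha)
      obtain ⟨c1, c2, c3, c4⟩ := ih v (nxt ++ [q0])
        (s + (if cellAt grid (p.1 + m.1) (p.2 + m.2) = "S" then 1 else 0)) hs hnxt' hnd'
      refine ⟨c1, c2, c3, ?_⟩
      intro x
      rw [c4 x]
      constructor
      · rintro (hx | ⟨hxi, hxv, m', hm', e1, e2⟩)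
        · rcases List.mem_append.1 hx with h | h
          · exact Or.inl h
          · rw [List.mem_singleton.1 h]
            exact Or.inr ⟨hq0in, hq0v.1, m, List.mem_cons_self .., rfl, rfl⟩
        · exact Or.inr ⟨hxi, hxv, m', List.mem_cons_of_mem _ hm', e1, e2⟩
      · rintro (hx | ⟨hxi, hxv, m', hm', e1, e2⟩)
        · exact Or.inl (List.mem_append.2 (Or.inl hx))
        · rcases List.mem_cons.1 hm' with rfl | hm''
          · refine Or.inl (List.mem_append.2 (Or.inr ?_))
            rw [List.mem_singleton]
            exact Prod.ext e1 e2
          · exact Or.inr ⟨hxi, hxv, m', hm'', e1, e2⟩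
    · have hstep : goB grid R C p (nxt, mark v nxt, s) m = (nxt, mark v nxt, s) := by
        unfold goB
        rw [if_neg hb]
      rw [hstep]
      obtain ⟨c1, c2, c3, c4⟩ := ih v nxt s hs hnxt hnd
      refine ⟨c1, c2, c3, ?_⟩
      intro x
      rw [c4 x]
      constructor
      · rintro (hx | ⟨hxi, hxv, m', hm', e1, e2⟩)
        · exact Or.inl hx
        · exact Or.inr ⟨hxi, hxv, m', List.mem_cons_of_mem _ hm', e1, e2⟩
      · rintro (hx | ⟨hxi, hxv, m', hm', e1, e2⟩)
        · exact Or.inl hx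
        · rcases List.mem_cons.1 hm' with rfl | hm''
          · -- the skipped head move: x must already be in nxt
            have hx0 : x = (p.1 + m'.1, p.2 + m'.2) := Prod.ext e1 e2
            have hxin : inb R C (p.1 + m'.1, p.2 + m'.2) := hx0 ▸ hxi
            obtain ⟨hb1, hb2, hb3, hb4⟩ := hxin
            have hvm := visGet_mark R C v nxt x hs hinb hxi
            have : visGet (mark v nxt) (p.1 + m'.1) (p.2 + m'.2) = true := by
              rcases hbool : visGet (mark v nxt) (p.1 + m'.1) (p.2 + m'.2) with _ | _
              · exact absurd ⟨hb1, hb2, hb3, hb4, hbool⟩ hb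
              · rfl
            rw [hx0] at hvm ⊢
            rw [this] at hvm
            rw [hx0] at hxv
            rw [hxv] at hvm
            simp at hvm
            exact Or.inl (hx0 ▸ hvm)
          · exact Or.inr ⟨hxi, hxv, m', hm'', e1, e2⟩

theorem layer_round (grid : List (List String)) (R C : Int) :
    ∀ (L : List (Int × Int)) (v : List (List Bool)) (nxt : List (Int × Int)) (s : Int),
    Shape R C v → (∀ q ∈ nxt, inb R C q ∧ visGet v q.1 q.2 = false) → nxt.Nodup →
    (L.foldl (stepB grid R C) (nxt, mark v nxt, s)).2.1
        = mark v (L.foldl (stepB grid R C) (nxt, mark v nxt, s)).1 ∧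
    (L.foldl (stepB grid R C) (nxt, mark v nxt, s)).1.Nodup ∧
    (∀ q ∈ (L.foldl (stepB grid R C) (nxt, mark v nxt, s)).1,
        inb R C q ∧ visGet v q.1 q.2 = false) ∧
    (∀ q, q ∈ (L.foldl (stepB grid R C) (nxt, mark v nxt, s)).1 ↔ q ∈ nxt ∨
      (inb R C q ∧ visGet v q.1 q.2 = false ∧
        ∃ p ∈ L, ∃ m ∈ moves, q.1 = p.1 + m.1 ∧ q.2 = p.2 + m.2)) := by
  intro L
  induction L with
  | nil =>
    intro v nxt s hs hnxt hnd
    exact ⟨rfl, hnd, hnxt, by simp⟩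
  | cons p t ih =>
    intro v nxt s hs hnxt hnd
    rw [List.foldl_cons]
    obtain ⟨g1, g2, g3, g4⟩ := go_round grid R C p moves v nxt s hs hnxt hnd
    have hstep : stepB grid R C (nxt, mark v nxt, s) p =
        moves.foldl (goB grid R C p) (nxt, mark v nxt, s) := rfl
    set st1 := moves.foldl (goB grid R C p) (nxt, mark v nxt, s) with hst1
    have heta : st1 = (st1.1, mark v st1.1, st1.2.2) := by
      rw [← g1]
    rw [hstep, heta]
    obtain ⟨c1, c2, c3, c4⟩ := ih v st1.1 st1.2.2 hs g3 g2
    refine ⟨c1, c2, c3, ?_⟩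
    intro x
    rw [c4 x]
    constructor
    · rintro (hx | ⟨hxi, hxv, p', hp', m', hm', e1, e2⟩)
      · rcases (g4 x).1 hx with h | ⟨hxi, hxv, m', hm', e1, e2⟩
        · exact Or.inl h
        · exact Or.inr ⟨hxi, hxv, p, List.mem_cons_self .., m', hm', e1, e2⟩
      · exact Or.inr ⟨hxi, hxv, p', List.mem_cons_of_mem _ hp', m', hm', e1, e2⟩
    · rintro (hx | ⟨hxi, hxv, p', hp', m', hm', e1, e2⟩)
      · exact Or.inl ((g4 x).2 (Or.inl hx))
      · rcases List.mem_cons.1 hp' with rfl | hp''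
        · exact Or.inl ((g4 x).2 (Or.inr ⟨hxi, hxv, m', hm', e1, e2⟩))
        · exact Or.inr ⟨hxi, hxv, p', hp'', m', hm', e1, e2⟩

-- ---- newCell against the frontier, under the BFS closure invariant ----

theorem newCell_iff (R C : Int) (v : List (List Bool)) (L : List (Int × Int))
    (hs : Shape R C v)
    (hL : ∀ p ∈ L, inb R C p ∧ visGet v p.1 p.2 = true)
    (hcl : ∀ x : Int × Int, inb R C x → visGet v x.1 x.2 = true → x ∉ L →
      ∀ m ∈ moves, inb R C (x.1 + m.1, x.2 + m.2) → visGet v (x.1 + m.1) (x.2 + m.2) = true)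
    (q : Int × Int) (hq : inb R C q) :
    newCell R C v q.1 q.2 = true ↔
      visGet v q.1 q.2 = false ∧ ∃ p ∈ L, ∃ m ∈ moves, q.1 = p.1 + m.1 ∧ q.2 = p.2 + m.2 := by
  unfold newCell
  simp only [Bool.and_eq_true, Bool.not_eq_true', List.any_eq_true, decide_eq_true_eq]
  constructor
  · rintro ⟨hv, m, hm, ⟨⟨⟨⟨h1, h2⟩, h3⟩, h4⟩, h5⟩⟩
    set nb : Int × Int := (q.1 + m.1, q.2 + m.2) with hnb
    have hnbin : inb R C nb := ⟨h1, h2, h3, h4⟩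
    by_cases hnL : nb ∈ L
    · refine ⟨hv, nb, hnL, (-m.1, -m.2), moves_symm m hm, by simp [hnb]⟩
    · exfalso
      have := hcl nb hnbin h5 hnL (-m.1, -m.2) (moves_symm m hm)
        (by simpa [hnb] using hq)
      simp only [hnb] at this
      have hq1 : q.1 + m.1 + -m.1 = q.1 := by ring
      have hq2 : q.2 + m.2 + -m.2 = q.2 := by ring
      rw [hq1, hq2] at this
      rw [this] at hv
      exact Bool.noConfusion hv
  · rintro ⟨hv, p, hp, m, hm, h1, h2⟩
    refine ⟨hv, (-m.1, -m.2), moves_symm m hm, ?_⟩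
    obtain ⟨hpa, hpb, hpc, hpd⟩ := (hL p hp).1
    have hv' := (hL p hp).2
    have e1 : q.1 + -m.1 = p.1 := by omega
    have e2 : q.2 + -m.2 = p.2 := by omega
    rw [e1, e2]
    exact ⟨⟨⟨⟨hpa, hpb⟩, hpc⟩, hpd⟩, hv'⟩

-- ---- the main correspondence: ghost frontier loop = B's sweep loop ----

theorem loop_eq (grid : List (List String)) (R C K : Int) :
    ∀ (n : Nat) (L : List (Int × Int)) (v : List (List Bool)) (s lvl : Int),
    (K - lvl).toNat = n →
    Shape R C v →
    (∀ p ∈ L, inb R C p ∧ visGet v p.1 p.2 = true) →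
    (∀ x : Int × Int, inb R C x → visGet v x.1 x.2 = true → x ∉ L →
      ∀ m ∈ moves, inb R C (x.1 + m.1, x.2 + m.2) → visGet v (x.1 + m.1) (x.2 + m.2) = true) →
    loopB grid R C K L v s lvl = sweepLoop grid R C K v s lvl := by
  intro n
  induction n using Nat.strong_induction_on with
  | _ n IH =>
    intro L v s lvl hn hs hL hcl
    by_cases hlt : lvl < K
    · -- one round on each side
      have hmvnil : mark v ([] : List (Int × Int)) = v := rfl
      obtain ⟨hw, hnd, hprop, hmem⟩ := by
        have h := layer_round grid R C L v [] s hs (by simp) List.nodup_nil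
        rw [hmvnil] at h
        exact h
      set st := L.foldl (stepB grid R C) ([], v, s) with hst
      have hmem' : ∀ q, q ∈ st.1 ↔ q ∈ selList R C v := by
        intro q
        rw [hmem q, mem_selList]
        constructor
        · rintro (h | ⟨hi, hv, hex⟩)
          · exact absurd h (List.not_mem_nil)
          · exact ⟨hi, (newCell_iff R C v L hs hL hcl q hi).2 ⟨hv, hex⟩⟩
        · rintro ⟨hi, hcell⟩
          obtain ⟨hv, hex⟩ := (newCell_iff R C v L hs hL hcl q hi).1 hcell
          exact Or.inr ⟨hi, hv, hex⟩
      have hs2 : st.2.2 = s + countS_ grid st.1 ∧ st.1 = (L.foldl (stepB grid R C) ([], v, 0)).1 := by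
        rw [hst, stepB_acc grid R C L [] v s, stepB_sheep grid R C L v]
        simp
      by_cases hne : selList R C v = []
      · -- fixpoint: both sides stop with s
        have hst1 : st.1 = [] := by
          rw [List.eq_nil_iff_forall_not_mem]
          intro q hq
          rw [hmem' q, hne] at hq
          exact absurd hq (List.not_mem_nil)
        have hany : anyNew (newMat R C v) = false := (anyNew_iff R C v).2 hne
        have hsweep : sweepLoop grid R C K v s lvl = s := by
          rw [sweepLoop]
          rw [if_neg (by simpa using hlt)]
          simp [hany]
        rw [hsweep]
        by_cases hLnil : L = []
        · rw [loopB, if_pos (Or.inl hLnil)]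
        · rw [loopB, if_neg (by simp [hLnil, hlt])]
          show loopB grid R C K st.1 st.2.1 st.2.2 (lvl + 1) = s
          rw [hst1, loopB]
          rw [if_pos (Or.inl rfl)]
          rw [hs2.1, hst1]
          simp [countS_]
      · -- a real round
        have hany : ¬ anyNew (newMat R C v) = false := fun h => hne ((anyNew_iff R C v).1 h)
        have hLnil : L ≠ [] := by
          intro h
          subst h
          apply hne
          rw [List.eq_nil_iff_forall_not_mem]
          intro q hq
          obtain ⟨hi, hcell⟩ := (mem_selList R C v q).1 hq
          obtain ⟨_, p, hp, _⟩ := (newCell_iff R C v [] hs hL hcl q hi).1 hcell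
          exact absurd hp (List.not_mem_nil)
        have hselinb : ∀ p ∈ selList R C v, inb R C p :=
          fun p hp => ((mem_selList R C v p).1 hp).1
        have hst1inb : ∀ p ∈ st.1, inb R C p := fun p hp => (hprop p hp).1
        have hperm : st.1.Perm (selList R C v) :=
          (List.perm_ext_iff_of_nodup hnd (nodup_selList R C v)).2 hmem'
        have hcount : countS_ grid st.1 = countS_ grid (selList R C v) := by
          unfold countS_
          exact (hperm.map _).sum_eq
        have hmarkeq : mark v st.1 = mark v (selList R C v) := by
          apply matEq R C _ _ (shape_mark R C v _ hs hst1inb) (shape_mark R C v _ hs hselinb)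
          intro r c hib
          rw [visGet_mark R C v st.1 (r, c) hs hst1inb hib,
            visGet_mark R C v (selList R C v) (r, c) hs hselinb hib]
          have := hmem' (r, c)
          simp [this]
        have hrec := IH ((K - (lvl + 1)).toNat) (by omega) st.1 (mark v (selList R C v))
          (s + countS_ grid (selList R C v)) (lvl + 1) rfl
          (shape_mark R C v _ hs hselinb) ?_ ?_
        · have hrhs : sweepLoop grid R C K v s lvl =
              sweepLoop grid R C K (mark v (selList R C v))
                (s + countS_ grid (selList R C v)) (lvl + 1) := by
            rw [sweepLoop]
            rw [if_neg (by simpa using hlt)]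
            show (if anyNew (newMat R C v) = false then s
              else sweepLoop grid R C K (mergeLoop grid R C (newMat R C v) v s).1
                (mergeLoop grid R C (newMat R C v) v s).2 (lvl + 1)) = _
            rw [if_neg hany, mergeLoop_eq grid R C v v s]
          rw [hrhs, loopB, if_neg (by simp [hLnil, hlt])]
          show loopB grid R C K st.1 st.2.1 st.2.2 (lvl + 1) = _
          rw [hw, hs2.1, hmarkeq, hcount, hrec]
        · -- new frontier invariant
          intro p hp
          refine ⟨hst1inb p hp, ?_⟩
          rw [visGet_mark R C v (selList R C v) p hs hselinb (hst1inb p hp)]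
          have : p ∈ selList R C v := (hmem' p).1 hp
          simp [this]
        · -- closure is re-established by the incoming-edge selection
          intro x hx hvx hxnot m hm hnb
          rw [visGet_mark R C v (selList R C v) x hs hselinb hx] at hvx
          rw [visGet_mark R C v (selList R C v) (x.1 + m.1, x.2 + m.2) hs hselinb hnb]
          have hxsel : x ∉ selList R C v := fun h => hxnot ((hmem' x).2 h)
          have hvxv : visGet v x.1 x.2 = true := by
            rcases hb : visGet v x.1 x.2 with _ | _
            · rw [hb] at hvx
              simp [hxsel] at hvx
            · rfl
          by_cases hvnb : visGet v (x.1 + m.1) (x.2 + m.2) = true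
          · simp [hvnb]
          · have hnbsel : (x.1 + m.1, x.2 + m.2) ∈ selList R C v := by
              rw [mem_selList]
              refine ⟨hnb, ?_⟩
              unfold newCell
              simp only [Bool.and_eq_true, Bool.not_eq_true', List.any_eq_true]
              refine ⟨by simpa using hvnb, (-m.1, -m.2), moves_symm m hm, ?_⟩
              have e1 : x.1 + m.1 + -m.1 = x.1 := by ring
              have e2 : x.2 + m.2 + -m.2 = x.2 := by ring
              simp only [Bool.and_eq_true, decide_eq_true_eq, e1, e2]
              obtain ⟨hx1, hx2, hx3, hx4⟩ := hx
              exact ⟨⟨⟨⟨hx1, hx2⟩, hx3⟩, hx4⟩, hvxv⟩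
            simp [hnbsel]
    · rw [loopB, if_pos (Or.inr hlt), sweepLoop, if_pos hlt]

-- ---- initial state ----

theorem findD_inb (grid : List (List String)) (R C : Int) (p : Int × Int)
    (h : findD grid R C = some p) : inb R C p := by
  unfold findD at h
  have hc : ∀ (r : Int), 0 ≤ r ∧ r < R → ∀ (cs : List Int), (∀ c ∈ cs, 0 ≤ c ∧ c < C) →
      ∀ (acc : Option (Int × Int)), (∀ x, acc = some x → inb R C x) →
      ∀ x, cs.foldl (fun acc c => if cellAt grid r c = "D" then some (r, c) else acc) acc
        = some x → inb R C x := by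
    intro r hr cs
    induction cs with
    | nil => intro _ acc hacc x hx; exact hacc x hx
    | cons c t ih =>
      intro hcs acc hacc x hx
      refine ih (fun y hy => hcs y (List.mem_cons_of_mem _ hy)) _ ?_ x hx
      intro y hy
      simp only at hy
      by_cases hd : cellAt grid r c = "D"
      · rw [if_pos hd] at hy
        obtain ⟨hc0, hcC⟩ := hcs c (List.mem_cons_self ..)
        cases hy
        exact ⟨hr.1, hr.2, hc0, hcC⟩
      · rw [if_neg hd] at hy
        exact hacc y hy
  have hr : ∀ (rs : List Int), (∀ r ∈ rs, 0 ≤ r ∧ r < R) →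
      ∀ (acc : Option (Int × Int)), (∀ x, acc = some x → inb R C x) →
      ∀ x, rs.foldl (fun acc r => (PySem.List.pyRange 0 C 1).foldl
        (fun acc c => if cellAt grid r c = "D" then some (r, c) else acc) acc) acc
        = some x → inb R C x := by
    intro rs
    induction rs with
    | nil => intro _ acc hacc x hx; exact hacc x hx
    | cons r t ih =>
      intro hrs acc hacc x hx
      refine ih (fun y hy => hrs y (List.mem_cons_of_mem _ hy)) _ ?_ x hx
      intro y hy
      exact hc r (hrs r (List.mem_cons_self ..)) _
        (fun c hcm => PySem.List.mem_pyRange_one.1 hcm) acc hacc y hy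
  exact hr _ (fun r hrm => PySem.List.mem_pyRange_one.1 hrm) none (by simp) p h

theorem shape_vis0 (R C : Int) (hR : 0 ≤ R) (hC : 0 ≤ C) :
    Shape R C ((PySem.List.pyRange 0 R 1).map (fun _ => List.replicate C.toNat false)) := by
  constructor
  · simp [PySem.List.length_pyRange_one]
    omega
  · intro row hrow
    obtain ⟨r, _, rfl⟩ := List.mem_map.1 hrow
    simp
    omega

theorem visGet_vis0 (R C : Int) (q : Int × Int) (hq : inb R C q) :
    visGet ((PySem.List.pyRange 0 R 1).map (fun _ => List.replicate C.toNat false)) q.1 q.2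
      = false := by
  obtain ⟨h1, h2, h3, h4⟩ := hq
  unfold visGet
  rw [PySem.List.pyGet?_of_nonneg _ h1]
  have hlen : q.1.toNat < ((PySem.List.pyRange 0 R 1).map
      (fun _ => List.replicate C.toNat false)).length := by
    simp [PySem.List.length_pyRange_one]
    omega
  rw [List.getElem?_eq_getElem hlen]
  simp only [List.getElem_map, Option.getD_some]
  rw [PySem.List.pyGet?_of_nonneg _ h3]
  have hclen : q.2.toNat < C.toNat := by omega
  simp [List.getElem?_eq_getElem, hclen]



-- ===== VERDICT (by name: the statement is the Claim_ definition above) =====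
theorem solve_spec : Claim_equal_solve := by
  intro grid K hdom hpre
  unfold Spec_solve
  simp only [solve, solve_alt]
  rcases hD : findD grid (grid.length : Int)
      ((PySem.List.pyGetD grid 0 ([] : List String)).length : Int) with _ | p
  · rfl
  · obtain ⟨sr, sc⟩ := p
    dsimp only
    set R : Int := (grid.length : Int) with hR
    set C : Int := ((PySem.List.pyGetD grid 0 ([] : List String)).length : Int) with hC
    have hinb : inb R C (sr, sc) := findD_inb grid R C (sr, sc) hD
    set vis0 := (PySem.List.pyRange 0 R 1).map (fun _ => List.replicate C.toNat false) with hvis0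
    have hs0 : Shape R C vis0 := shape_vis0 R C (by positivity) (by positivity)
    have hs1 : Shape R C (visSet vis0 sr sc) := shape_visSet R C vis0 sr sc hs0 hinb
    rcases eq_or_ne K 0 with hK0 | hK0
    · subst hK0
      rw [loopA]
      have h0 : ¬ ((0 : Int) < 0 ∧ cellAt grid sr sc = "S") := by simp
      rw [if_neg h0, if_pos rfl, loopA, sweepLoop]
      simp
    · have hK : 0 < K := lt_of_le_of_ne hpre.2.1 (Ne.symm hK0)
      rw [start_step grid R C K hK sr sc (visSet vis0 sr sc)]
      apply loop_eq grid R C K K.toNat [(sr, sc)] (visSet vis0 sr sc) 0 0 (by omega) hs1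
      · intro p hp
        rw [List.mem_singleton.1 hp]
        refine ⟨hinb, ?_⟩
        rw [visGet_visSet R C vis0 sr sc sr sc hs0 hinb hinb]
        simp
      · intro x hx hvx hxnot m hm hnb
        exfalso
        rw [visGet_visSet R C vis0 sr sc x.1 x.2 hs0 hinb hx] at hvx
        by_cases hxe : x.1 = sr ∧ x.2 = sc
        · exact hxnot (by rw [List.mem_singleton]; exact Prod.ext hxe.1 hxe.2)
        · rw [if_neg hxe, visGet_vis0 R C x hx] at hvx
          exact Bool.noConfusion hvx
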